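-- pv_equiv track=rewrite | github.com/CocoCJL/scrabble_word_generator | utils/players/longest_word.py | _simplify_pattern
-- ===== SOURCE A (Python) =====
-- def _simplify_pattern(pattern):
--     """
--     Simplify a pattern by combining adjacent optional ranges and underscores.
--
--     Examples:
--         (0,2)_(0,6) -> (1,9)  [min: 0+1+0=1, max: 2+1+6=9]
--         (0,3)AB___(0,4) -> (0,3)AB(2,6)  [___ becomes part of range: min 2, max 2+4=6]
--         AB___ -> AB(2,2)  [three underscores = exactly 2 more chars]
--     """
--
--     # Find all tokens: ranges like (0,5), blocks like ABC, underscores like ___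
--     tokens = []
--     i = 0
--     while i < len(pattern):
--         if pattern[i] == '(':
--             # Range token
--             j = pattern.index(')', i)
--             tokens.append(pattern[i:j+1])
--             i = j + 1
--         elif pattern[i] == '_':
--             # Count consecutive underscores
--             j = i
--             while j < len(pattern) and pattern[j] == '_':
--                 j += 1
--             count = j - i
--             tokens.append('_' * count)
--             i = j
--         else:
--             # Fixed letter block
--             j = i
--             while j < len(pattern) and pattern[j] not in '(_':
--                 j += 1
--             tokens.append(pattern[i:j])
--             i = j
--
--     # Now combine adjacent ranges and underscores
--     simplified = []
--     i = 0
--     while i < len(tokens):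
--         token = tokens[i]
--
--         # Check if this is a range or underscores that can be combined with next
--         if token.startswith('(') or token.startswith('_'):
--             # Look ahead to collect all adjacent ranges/underscores
--             sequence = [token]
--             j = i + 1
--             while j < len(tokens) and (tokens[j].startswith('(') or tokens[j].startswith('_')):
--                 sequence.append(tokens[j])
--                 j += 1
--
--             if len(sequence) > 1:
--                 # Combine the sequence
--                 min_sum = 0
--                 max_sum = 0
--                 for t in sequence:
--                     if t.startswith('('):
--                         # Parse (min,max)
--                         parts = t[1:-1].split(',')
--                         min_sum += int(parts[0])
--                         max_sum += int(parts[1])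
--                     else:  # underscores
--                         count = len(t)
--                         min_sum += count
--                         max_sum += count
--
--                 # Add combined range
--                 if min_sum == max_sum:
--                     # Exact count - use underscores
--                     simplified.append('_' * min_sum)
--                 else:
--                     simplified.append(f'({min_sum},{max_sum})')
--                 i = j
--             else:
--                 # Single token, just add it
--                 simplified.append(token)
--                 i += 1
--         else:
--             # Fixed block, just add it
--             simplified.append(token)
--             i += 1
--
--     return ''.join(simplified)
-- ===== SOURCE B (Python) =====
-- def _simplify_pattern(pattern):
--     """Single linear scan with a numeric run accumulator instead of
--     tokenize-then-merge; no intermediate token list, no lookahead."""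
--     out = []
--     min_sum = max_sum = count = 0
--     first = ''
--
--     def flush():
--         nonlocal min_sum, max_sum, count, first
--         if count == 1:
--             out.append(first)
--         elif count > 1:
--             out.append('_' * min_sum if min_sum == max_sum else f'({min_sum},{max_sum})')
--         min_sum = max_sum = count = 0
--         first = ''
--
--     i = 0
--     n = len(pattern)
--     while i < n:
--         c = pattern[i]
--         if c == '(':
--             j = pattern.index(')', i)
--             tok = pattern[i:j + 1]
--             parts = tok[1:-1].split(',')
--             lo, hi = int(parts[0]), int(parts[1])
--             if count == 0:
--                 first = tok
--             min_sum += lo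
--             max_sum += hi
--             count += 1
--             i = j + 1
--         elif c == '_':
--             j = i
--             while j < n and pattern[j] == '_':
--                 j += 1
--             k = j - i
--             if count == 0:
--                 first = '_' * k
--             min_sum += k
--             max_sum += k
--             count += 1
--             i = j
--         else:
--             flush()
--             j = i
--             while j < n and pattern[j] not in '(_':
--                 j += 1
--             out.append(pattern[i:j])
--             i = j
--     flush()
--     return ''.join(out)
-- ===== Notes on version B (the rewrite author's own statement) =====
-- stated objective: alternative
-- what changed: Replaced A's two-phase tokenize-then-merge (build a token list, then a second loop with an inner look-ahead scan and an inner summing loop) by a single fused scan that keeps a numeric run accumulator (min/max sums, token count, first raw token) and flushes it at each fixed letter block and at the end.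
-- outside the precondition, e.g. on _simplify_pattern('A(x)B'): A returns 'A(x)B', B raises ValueError
import Mathlib
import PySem

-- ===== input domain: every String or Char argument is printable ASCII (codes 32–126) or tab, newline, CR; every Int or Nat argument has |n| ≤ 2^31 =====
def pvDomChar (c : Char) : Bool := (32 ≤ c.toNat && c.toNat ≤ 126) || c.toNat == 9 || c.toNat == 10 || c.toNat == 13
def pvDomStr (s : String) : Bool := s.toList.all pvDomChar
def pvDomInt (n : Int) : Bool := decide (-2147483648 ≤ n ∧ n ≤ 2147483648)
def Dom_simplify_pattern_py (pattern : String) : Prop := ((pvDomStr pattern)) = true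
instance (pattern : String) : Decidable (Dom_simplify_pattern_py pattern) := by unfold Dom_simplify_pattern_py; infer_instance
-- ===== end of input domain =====

-- B replaces A's tokenize-then-lookahead-merge with a single fused scan keeping a
-- numeric run accumulator (min/max sums, token count, first raw token); objective: alternative.

-- ===== PORT A =====

-- shared by both ports (both Pythons execute the same three lines to parse '(lo,hi)'):
-- parts = t[1:-1].split(','); int(parts[0]); int(parts[1]).  Python raises where ofChars?
-- returns none or parts[1] is missing; those inputs are outside Pre_ (getD is a dummy there).
def pvParse (t : List Char) : Int × Int :=
  let parts := PySem.Chars.splitOn (PySem.List.slice t (some 1) (some (-1))) [',']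
  ((PySem.Int.ofChars? (parts.getD 0 [])).getD 0,
   (PySem.Int.ofChars? (parts.getD 1 [])).getD 0)

-- f'({m},{M})'
def pvRender (m M : Int) : List Char :=
  '(' :: PySem.Int.toChars m ++ ',' :: PySem.Int.toChars M ++ [')']

-- token.startswith('(') or token.startswith('_')
def pvIsRun (t : List Char) : Bool := t.head? = some '(' || t.head? = some '_'

-- A, phase 1: the index-based while loop scanning pattern[i:], one token per step.
-- pattern.index(')', i) searches from i; pattern[i] = '(' ≠ ')' so it equals a search in rest.
def pvTokA : List Char → List (List Char)
  | [] => []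
  | c :: rest =>
    if c = '(' then
      match List.findIdx? (· = ')') rest with
      | some j => ((c :: rest).take (j + 2)) :: pvTokA (rest.drop (j + 1))
      | none => [c :: rest]   -- Python raises ValueError here (outside Pre_)
    else if c = '_' then
      (c :: rest.takeWhile (· = '_')) :: pvTokA (rest.dropWhile (· = '_'))
    else
      (c :: rest.takeWhile (fun d => ¬ (d = '(' ∨ d = '_')))
        :: pvTokA (rest.dropWhile (fun d => ¬ (d = '(' ∨ d = '_')))
termination_by cs => cs.length
decreasing_by
  all_goals first
    | (simp; omega)
    | (simpa using Nat.lt_succ_of_le (List.length_dropWhile_le _ _))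

-- A's inner 'for t in sequence' fold accumulating (min_sum, max_sum)
def pvCombineA (acc : Int × Int) (seq : List (List Char)) : Int × Int :=
  seq.foldl (fun p t =>
    if t.head? = some '(' then
      (p.1 + (pvParse t).1, p.2 + (pvParse t).2)
    else
      (p.1 + t.length, p.2 + t.length)) acc

-- A, phase 2: the while loop over tokens with the look-ahead inner while
def pvMergeA : List (List Char) → List (List Char)
  | [] => []
  | t :: rest =>
    if pvIsRun t then
      if (t :: rest.takeWhile pvIsRun).length > 1 then
        (let s := pvCombineA (0, 0) (t :: rest.takeWhile pvIsRun)
         if s.1 = s.2 then List.replicate s.1.toNat '_' else pvRender s.1 s.2)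
          :: pvMergeA (rest.dropWhile pvIsRun)
      else t :: pvMergeA rest
    else t :: pvMergeA rest
termination_by ts => ts.length
decreasing_by
  all_goals first
    | (simp; omega)
    | (simpa using Nat.lt_succ_of_le (List.length_dropWhile_le _ _))

def simplify_pattern_py (pattern : String) : String :=
  String.ofList (pvMergeA (pvTokA pattern.toList)).flatten

-- ===== PORT B =====

-- B's flush(): one token → its raw text verbatim; two or more → the combined run
def pvFlushB (m M : Int) (cnt : Nat) (first : List Char) : List Char :=
  if cnt = 1 then first
  else if cnt > 1 then
    (if m = M then List.replicate m.toNat '_' else pvRender m M)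
  else []

-- B's single while loop: state = (min_sum, max_sum, count, first, out)
def pvGoB : List Char → Int → Int → Nat → List Char → List Char → List Char
  | [], m, M, cnt, first, acc => acc ++ pvFlushB m M cnt first
  | c :: rest, m, M, cnt, first, acc =>
    if c = '(' then
      match List.findIdx? (· = ')') rest with
      | some j =>
        pvGoB (rest.drop (j + 1))
          (m + (pvParse ((c :: rest).take (j + 2))).1)
          (M + (pvParse ((c :: rest).take (j + 2))).2)
          (cnt + 1) (if cnt = 0 then (c :: rest).take (j + 2) else first) acc
      | none => acc   -- Python raises ValueError here (outside Pre_)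
    else if c = '_' then
      pvGoB (rest.dropWhile (· = '_'))
        (m + (c :: rest.takeWhile (· = '_')).length)
        (M + (c :: rest.takeWhile (· = '_')).length)
        (cnt + 1) (if cnt = 0 then c :: rest.takeWhile (· = '_') else first) acc
    else
      pvGoB (rest.dropWhile (fun d => ¬ (d = '(' ∨ d = '_'))) 0 0 0 []
        (acc ++ pvFlushB m M cnt first
             ++ (c :: rest.takeWhile (fun d => ¬ (d = '(' ∨ d = '_'))))
termination_by cs _ _ _ _ _ => cs.length
decreasing_by
  all_goals first
    | (simp; omega)
    | (simpa using Nat.lt_succ_of_le (List.length_dropWhile_le _ _))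

def simplify_pattern_py_alt (pattern : String) : String :=
  String.ofList (pvGoB pattern.toList 0 0 0 [] [])

-- ===== PRECONDITION & SPEC =====

-- the contents of a '(…)' token parse as Python 'int(parts[0]), int(parts[1])'
def pvParseOK (inside : List Char) : Bool :=
  let parts := PySem.Chars.splitOn inside [',']
  decide (2 ≤ parts.length) && (PySem.Int.ofChars? (parts.getD 0 [])).isSome
    && (PySem.Int.ofChars? (parts.getD 1 [])).isSome

-- the '(' at position i is closed by a later ')' and the characters between them parse as 'lo,hi'
def pvRangeOK (cs : List Char) (i : Nat) : Bool :=
  match List.findIdx? (· = ')') (cs.drop (i + 1)) with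
  | some j => pvParseOK ((cs.drop (i + 1)).take j)
  | none => false

-- Pre_ excludes patterns with an unclosed '(' (A raises ValueError) and patterns holding a
-- malformed '(…)' range token (no comma or non-int bounds): A raises on those when the token
-- is adjacent to another range/underscore token, and only copies it verbatim by the accident
-- of its lazy two-phase parsing when the token stands alone; B parses every range eagerly.
def Pre_simplify_pattern_py (pattern : String) : Prop :=
  ∀ i < pattern.toList.length,
    pattern.toList[i]? = some '(' → pvRangeOK pattern.toList i = true
instance (pattern : String) : Decidable (Pre_simplify_pattern_py pattern) := by
  unfold Pre_simplify_pattern_py; infer_instance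

def pvWitness_simplify_pattern_py : String := "(0,2)_(0,6)"

def Spec_simplify_pattern_py (pattern : String) (out : String) : Prop := out = simplify_pattern_py_alt pattern
instance (pattern : String) (out : String) : Decidable (Spec_simplify_pattern_py pattern out) := by unfold Spec_simplify_pattern_py; infer_instance

-- ===== CLAIM (what is proved, stated in full; the proofs are below) =====
def Claim_equal_simplify_pattern_py : Prop := ∀ (pattern : String), Dom_simplify_pattern_py pattern → Pre_simplify_pattern_py pattern → Spec_simplify_pattern_py pattern (simplify_pattern_py pattern)

-- ===== LEMMAS AND PROOFS =====

-- well-formed pattern: every '(' is closed by a later ')' and its contents parse as 'lo,hi'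
def pvWf : List Char → Bool
  | [] => true
  | c :: rest =>
    if c = '(' then
      match List.findIdx? (· = ')') rest with
      | some j => pvParseOK (rest.take j) && pvWf (rest.drop (j + 1))
      | none => false
    else pvWf rest
termination_by cs => cs.length
decreasing_by
  all_goals (simp; try omega)

-- Pre_ (a condition on every index) implies the token-level well-formedness pvWf
theorem pvRangeOK_drop (cs : List Char) (k i : Nat) :
    pvRangeOK (cs.drop k) i = pvRangeOK cs (k + i) := by
  unfold pvRangeOK
  rw [List.drop_drop]
  rfl

theorem pvWf_of_pre : ∀ (n : ℕ) (cs : List Char), cs.length ≤ n →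
    (∀ i < cs.length, cs[i]? = some '(' → pvRangeOK cs i = true) →
    pvWf cs = true := by
  intro n
  induction n with
  | zero =>
    intro cs hlen _
    have : cs = [] := List.length_eq_zero_iff.mp (Nat.le_zero.mp hlen)
    subst this; rw [pvWf]
  | succ n ih =>
    intro cs hlen hpre
    match cs with
    | [] => rw [pvWf]
    | c :: rest =>
      by_cases hc : c = '('
      · subst hc
        have h0 := hpre 0 (by simp) (by simp)
        rw [pvRangeOK] at h0
        simp only [List.drop_succ_cons, List.drop_zero] at h0
        cases hfind : List.findIdx? (· = ')') rest with
        | none => rw [hfind] at h0; simp at h0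
        | some j =>
          rw [hfind] at h0
          rw [pvWf, if_pos rfl, hfind]
          refine Bool.and_eq_true_iff.mpr ⟨h0, ?_⟩
          refine ih (rest.drop (j + 1)) ?_ ?_
          · have := List.length_drop (l := rest) (i := j + 1)
            simp at hlen; omega
          · intro i hi hg
            have hshift : pvRangeOK (rest.drop (j + 1)) i
                = pvRangeOK (('(' :: rest)) (j + 2 + i) := by
              have h1 : rest.drop (j + 1) = (('(' : Char) :: rest).drop (j + 2) := by simp
              rw [h1, pvRangeOK_drop]
            rw [hshift]
            refine hpre (j + 2 + i) ?_ ?_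
            · have := List.length_drop (l := rest) (i := j + 1)
              simp at hi ⊢; omega
            · have h1 : rest.drop (j + 1) = (('(' : Char) :: rest).drop (j + 2) := by simp
              rw [h1, List.getElem?_drop] at hg
              exact hg
      · rw [pvWf, if_neg hc]
        refine ih rest (by simp at hlen; omega) ?_
        intro i hi hg
        have hshift : pvRangeOK rest i = pvRangeOK (c :: rest) (1 + i) := by
          have h1 : rest = (c :: rest).drop 1 := rfl
          conv_lhs => rw [h1]
          rw [pvRangeOK_drop]
        rw [hshift]
        refine hpre (1 + i) (by simp at hi ⊢; omega) ?_
        have : (c :: rest)[1 + i]? = rest[i]? := by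
          have : 1 + i = i + 1 := by omega
          rw [this, List.getElem?_cons_succ]
        rw [this, hg]


-- token-level machine: B's state machine replayed on A's token list
def pvProc : List (List Char) → Int → Int → Nat → List Char → List Char
  | [], m, M, cnt, first => pvFlushB m M cnt first
  | t :: rest, m, M, cnt, first =>
    if t.head? = some '(' then
      pvProc rest (m + (pvParse t).1) (M + (pvParse t).2) (cnt + 1)
        (if cnt = 0 then t else first)
    else if t.head? = some '_' then
      pvProc rest (m + t.length) (M + t.length) (cnt + 1) (if cnt = 0 then t else first)
    else
      pvFlushB m M cnt first ++ t ++ pvProc rest 0 0 0 []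

theorem pvProc_nil (m M : Int) (cnt : Nat) (first : List Char) :
    pvProc [] m M cnt first = pvFlushB m M cnt first := rfl

theorem pvProc_cons (t : List Char) (rest : List (List Char)) (m M : Int) (cnt : Nat)
    (first : List Char) :
    pvProc (t :: rest) m M cnt first =
      (if t.head? = some '(' then
        pvProc rest (m + (pvParse t).1) (M + (pvParse t).2) (cnt + 1)
          (if cnt = 0 then t else first)
      else if t.head? = some '_' then
        pvProc rest (m + t.length) (M + t.length) (cnt + 1) (if cnt = 0 then t else first)
      else
        pvFlushB m M cnt first ++ t ++ pvProc rest 0 0 0 []) := rfl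

theorem pvWf_dropWhile (p : Char → Bool) (hp : ∀ x, p x = true → x ≠ '(')
    (l : List Char) (h : pvWf l = true) : pvWf (l.dropWhile p) = true := by
  induction l with
  | nil => simpa using h
  | cons c rest ih =>
    by_cases hc : p c = true
    · have hcp : ¬ c = '(' := hp c hc
      rw [List.dropWhile_cons_of_pos hc]
      apply ih
      rw [pvWf] at h
      simpa [hcp] using h
    · rw [List.dropWhile_cons_of_neg hc]
      exact h

theorem pvGoB_eq_pvProc : ∀ (n : ℕ) (cs : List Char), cs.length ≤ n → pvWf cs = true →
    ∀ (m M : Int) (cnt : Nat) (first acc : List Char),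
    pvGoB cs m M cnt first acc = acc ++ pvProc (pvTokA cs) m M cnt first := by
  intro n
  induction n with
  | zero =>
    intro cs hlen _ m M cnt first acc
    have : cs = [] := List.length_eq_zero_iff.mp (Nat.le_zero.mp hlen)
    subst this
    simp [pvGoB, pvTokA, pvProc]
  | succ n ih =>
    intro cs hlen hwf m M cnt first acc
    match cs with
    | [] => simp [pvGoB, pvTokA, pvProc]
    | c :: rest =>
      by_cases hc : c = '('
      · subst hc
        rw [pvWf] at hwf
        rw [if_pos rfl] at hwf
        cases hfind : List.findIdx? (· = ')') rest with
        | none => rw [hfind] at hwf; simp at hwf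
        | some j =>
          rw [hfind] at hwf
          have hwf' : pvWf (rest.drop (j + 1)) = true := (Bool.and_elim_right hwf)
          rw [pvGoB, pvTokA]
          simp only [hfind, reduceIte]
          rw [pvProc_cons]
          have htok : ((('(' : Char) :: rest).take (j + 2)).head? = some '(' := by
            simp [List.take_succ_cons]
          rw [if_pos htok]
          apply ih _ ?_ hwf'
          have := List.length_drop (l := rest) (i := j + 1)
          simp at hlen ⊢
          omega
      · by_cases hu : c = '_'
        · subst hu
          have hwf' : pvWf rest = true := by rw [pvWf] at hwf; simpa [hc] using hwf
          rw [pvGoB, pvTokA]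
          rw [if_neg hc, if_neg hc, if_pos rfl, if_pos rfl]
          rw [pvProc_cons]
          simp only [List.head?_cons, Option.some.injEq, reduceIte]
          refine ih _ ?_ (pvWf_dropWhile _ (by intro x hx; simp at hx; simp [hx]) _ hwf') _ _ _ _ _
          exact le_trans (List.length_dropWhile_le _ _) (by simp at hlen; omega)
        · have hwf' : pvWf rest = true := by rw [pvWf] at hwf; simpa [hc] using hwf
          have hlen' : rest.length ≤ n := by simp at hlen; omega
          rw [pvGoB, pvTokA]
          rw [if_neg hc, if_neg hc, if_neg hu, if_neg hu]
          rw [pvProc_cons]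
          simp only [List.head?_cons, Option.some.injEq, if_neg hc, if_neg hu]
          rw [ih _ (le_trans (List.length_dropWhile_le _ _) hlen')
              (pvWf_dropWhile _ (by intro x hx; simp at hx; exact hx.1) _ hwf') 0 0 0 []]
          simp

-- foldl shift for the (min_sum, max_sum) accumulator
theorem pvCombineA_shift (seq : List (List Char)) :
    ∀ (p : Int × Int), pvCombineA p seq = (p.1 + (pvCombineA (0,0) seq).1, p.2 + (pvCombineA (0,0) seq).2) := by
  induction seq with
  | nil => intro p; simp [pvCombineA]
  | cons t rest ih =>
    intro p
    simp only [pvCombineA, List.foldl_cons] at *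
    by_cases ht : t.head? = some '('
    · rw [if_pos ht, if_pos ht, ih, ih ((0:Int)+(pvParse t).1, (0:Int)+(pvParse t).2)]
      ring_nf
    · rw [if_neg ht, if_neg ht, ih, ih ((0:Int)+(t.length:Int), (0:Int)+(t.length:Int))]
      ring_nf

-- running pvProc through a block of run tokens just accumulates the combine sums
theorem pvProc_runs (seq : List (List Char)) (hseq : ∀ t ∈ seq, pvIsRun t = true) :
    ∀ (r : List (List Char)) (m M : Int) (cnt : Nat) (first : List Char),
    pvProc (seq ++ r) m M cnt first =
      pvProc r (m + (pvCombineA (0,0) seq).1) (M + (pvCombineA (0,0) seq).2)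
        (cnt + seq.length)
        (if cnt = 0 then seq.headD first else first) := by
  induction seq with
  | nil => intro r m M cnt first; simp [pvCombineA]
  | cons t rest ih =>
    intro r m M cnt first
    have hrun := hseq t (by simp)
    have hrest : ∀ u ∈ rest, pvIsRun u = true := fun u hu => hseq u (by simp [hu])
    simp only [List.cons_append]
    rw [pvProc_cons]
    have hlen1 : (t :: rest).length = rest.length + 1 := by simp
    have hcnt : cnt + 1 + rest.length = cnt + (rest.length + 1) := by omega
    have hne : ¬ (cnt + 1 = 0) := by omega
    by_cases ht : t.head? = some '('
    · rw [if_pos ht, ih hrest]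
      have hcomb : pvCombineA (0,0) (t :: rest) =
          ((pvParse t).1 + (pvCombineA (0,0) rest).1, (pvParse t).2 + (pvCombineA (0,0) rest).2) := by
        simp only [pvCombineA, List.foldl_cons, if_pos ht]
        have := pvCombineA_shift rest ((0:Int) + (pvParse t).1, (0:Int) + (pvParse t).2)
        simp only [pvCombineA] at this ⊢
        rw [this]; ring_nf
      rw [hcomb, if_neg hne, hlen1, hcnt]
      simp only [add_assoc, List.headD_cons]
    · have ht' : t.head? = some '_' := by
        unfold pvIsRun at hrun
        rcases Bool.or_eq_true_iff.mp hrun with h | h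
        · exact absurd (by simpa using h) ht
        · simpa using h
      rw [if_neg ht, if_pos ht', ih hrest]
      have hcomb : pvCombineA (0,0) (t :: rest) =
          ((t.length : Int) + (pvCombineA (0,0) rest).1, (t.length : Int) + (pvCombineA (0,0) rest).2) := by
        simp only [pvCombineA, List.foldl_cons, if_neg ht]
        have := pvCombineA_shift rest ((0:Int) + (t.length:Int), (0:Int) + (t.length:Int))
        simp only [pvCombineA] at this ⊢
        rw [this]; ring_nf
      rw [hcomb, if_neg hne, hlen1, hcnt]
      simp only [add_assoc, List.headD_cons]

theorem pvHead_dropWhile_not_run (ts : List (List Char)) (u : List Char) (r' : List (List Char))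
    (h : ts.dropWhile pvIsRun = u :: r') : pvIsRun u = false := by
  induction ts with
  | nil => simp at h
  | cons a as ih =>
    by_cases ha : pvIsRun a = true
    · rw [List.dropWhile_cons_of_pos ha] at h
      exact ih h
    · rw [List.dropWhile_cons_of_neg ha] at h
      cases h
      exact Bool.eq_false_iff.mpr ha

theorem pvMergeA_eq_pvProc : ∀ (n : ℕ) (ts : List (List Char)), ts.length ≤ n →
    (pvMergeA ts).flatten = pvProc ts 0 0 0 [] := by
  intro n
  induction n with
  | zero =>
    intro ts hlen
    have : ts = [] := List.length_eq_zero_iff.mp (Nat.le_zero.mp hlen)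
    subst this
    simp [pvMergeA, pvProc, pvFlushB]
  | succ n ih =>
    intro ts hlen
    match ts with
    | [] => simp [pvMergeA, pvProc, pvFlushB]
    | t :: rest =>
      by_cases hrun : pvIsRun t = true
      · -- run token: decompose rest into its run prefix and the remainder
        have hdecomp : rest = rest.takeWhile pvIsRun ++ rest.dropWhile pvIsRun :=
          (List.takeWhile_append_dropWhile).symm
        have hseq : ∀ u ∈ t :: rest.takeWhile pvIsRun, pvIsRun u = true := by
          intro u hu
          rcases List.mem_cons.mp hu with h | h
          · subst h; exact hrun
          · exact List.mem_takeWhile_imp h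
        have hlen' : (rest.dropWhile pvIsRun).length ≤ n := by
          have := List.length_dropWhile_le pvIsRun rest
          simp at hlen; omega
        -- B side collapsed to: flush of the whole run, then the tail
        have hstep := pvProc_runs (t :: rest.takeWhile pvIsRun) hseq (rest.dropWhile pvIsRun) 0 0 0 []
        rw [show ((t :: rest.takeWhile pvIsRun) ++ rest.dropWhile pvIsRun) = t :: rest from by
              rw [List.cons_append, ← hdecomp]] at hstep
        have hproc : pvProc (t :: rest) 0 0 0 [] =
            pvFlushB (pvCombineA (0,0) (t :: rest.takeWhile pvIsRun)).1
                     (pvCombineA (0,0) (t :: rest.takeWhile pvIsRun)).2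
                     (t :: rest.takeWhile pvIsRun).length t
              ++ (pvMergeA (rest.dropWhile pvIsRun)).flatten := by
          rw [hstep]
          cases hr : rest.dropWhile pvIsRun with
          | nil =>
            rw [pvProc_nil, pvMergeA]
            simp [List.headD]
          | cons u r' =>
            have hu : pvIsRun u = false := pvHead_dropWhile_not_run rest u r' hr
            have hu' : ¬ (pvIsRun u = true) := by simp [hu]
            have hu1 : ¬ (u.head? = some '(') := by
              intro hh; rw [pvIsRun, hh] at hu; simp at hu
            have hu2 : ¬ (u.head? = some '_') := by
              intro hh; rw [pvIsRun, hh] at hu; simp at hu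
            rw [pvProc_cons, if_neg hu1, if_neg hu2]
            rw [pvMergeA, if_neg hu']
            have hlr' : r'.length ≤ n := by
              have : (u :: r').length ≤ n := hr ▸ hlen'
              simp at this; omega
            rw [List.flatten_cons, ih r' hlr']
            simp [List.headD, List.append_assoc]
        rw [hproc]
        by_cases hone : rest.takeWhile pvIsRun = []
        · -- a single run token: A appends it verbatim; B's flush with count 1 does the same
          have hr1 : rest.dropWhile pvIsRun = rest := by
            conv_rhs => rw [hdecomp]
            rw [hone, List.nil_append]
          have hlt : ¬ ((t :: rest.takeWhile pvIsRun).length > 1) := by simp [hone]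
          rw [pvMergeA, if_pos hrun, if_neg hlt]
          rw [List.flatten_cons, hr1]
          have hlen1 : (t :: rest.takeWhile pvIsRun).length = 1 := by simp [hone]
          rw [hlen1, pvFlushB, if_pos rfl]
        · -- two or more run tokens: both sides emit the combined range
          have hgt : (t :: rest.takeWhile pvIsRun).length > 1 := by
            simp [List.length_pos_iff, hone]
          rw [pvMergeA, if_pos hrun, if_pos hgt]
          rw [List.flatten_cons]
          congr 1
          rw [pvFlushB, if_neg (by omega : ¬ ((t :: rest.takeWhile pvIsRun).length = 1)),
              if_pos hgt]
      · -- fixed block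
        have hwfrest : rest.length ≤ n := by simp at hlen; omega
        rw [pvMergeA, pvProc_cons]
        have ht1 : ¬ t.head? = some '(' := by
          intro h; exact hrun (by simp [pvIsRun, h])
        have ht2 : ¬ t.head? = some '_' := by
          intro h; exact hrun (by simp [pvIsRun, h])
        rw [if_neg (by simp [hrun]), if_neg ht1, if_neg ht2]
        rw [List.flatten_cons, ih rest hwfrest]
        simp [pvFlushB]

-- ===== VERDICT (by name: the statement is the Claim_ definition above) =====
theorem simplify_pattern_py_spec : Claim_equal_simplify_pattern_py := by
  intro pattern _ hpre
  have hwf : pvWf pattern.toList = true :=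
    pvWf_of_pre pattern.toList.length _ le_rfl hpre
  unfold Spec_simplify_pattern_py simplify_pattern_py simplify_pattern_py_alt
  rw [pvGoB_eq_pvProc pattern.toList.length _ le_rfl hwf]
  rw [← pvMergeA_eq_pvProc (pvTokA pattern.toList).length _ le_rfl]
  simp
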